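-- pv_equiv track=rewrite | github.com/joshanashakya/dissertation | workspace/dataset/java-python/GeeksForGeeks/1452/A/2.py | maxXOR
-- ===== SOURCE A (Python) =====
-- from collections import deque
--
-- def maxXOR(arr):
--     # Declaring stack
--     stack = deque()
--
--     # Initializing the length of stack
--     l = 0
--
--     # Initializing res1 for array
--     # traversal of left to right
--     res1 = 0
--
--     # Traversing the array
--     for i in arr:
--
--         # If there are elements in stack
--         # And top of stack is less than
--         # current element then pop the stack
--         while stack and stack[-1]<i:
--             stack.pop()
--             # Simultaneously decrease the
--             # length of stack
--             l-= 1
--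
--         # Append the current element
--         stack.append(i)
--         # Increase the length of stack
--         l+= 1
--
--         # If there are atleast two elements
--         # in stack If xor of top two elements
--         # is maximum, we will update the res1
--         if l>1:
--             res1 = max(res1, stack[-1]^stack[-2])
--
--
--     # Similar to the above method,
--     # we calculate the xor for reversed array
--     res2 = 0
--
--     # Clear the whole stack
--     stack.clear()
--     l = 0
--
--     # Reversing the array
--     arr.reverse()
--     for i in arr:
--         while stack and stack[-1]<i:
--             stack.pop()
--             l-= 1
--
--         stack.append(i)
--         l+= 1
--         if l>1:
--             res2 = max(res2, stack[-1]^stack[-2])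
--
--     # Printing the maximum of res1, res2
--     return max(res1, res2)
-- ===== SOURCE B (Python) =====
-- def maxXOR(arr):
--     # Keeps a reversed-prefix list and pairs each element with the nearest
--     # previous element >= it (no stack); mutates arr in place via reverse(),
--     # like the original.
--     def best(a):
--         res = 0
--         prev = []  # earlier elements, most recent first
--         for x in a:
--             for y in prev:
--                 if y >= x:
--                     res = max(res, x ^ y)
--                     break
--             prev.insert(0, x)
--         return res
--     res1 = best(arr)
--     arr.reverse()
--     return max(res1, best(arr))
-- ===== Notes on version B (the rewrite author's own statement) =====
-- stated objective: simpler
-- what changed: Replaces A's monotonic stack (with its explicit length counter) by a direct scan of the already-seen elements for the nearest previous element >= the current one, in both passes; the in-place arr.reverse() is kept.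
import Mathlib
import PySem

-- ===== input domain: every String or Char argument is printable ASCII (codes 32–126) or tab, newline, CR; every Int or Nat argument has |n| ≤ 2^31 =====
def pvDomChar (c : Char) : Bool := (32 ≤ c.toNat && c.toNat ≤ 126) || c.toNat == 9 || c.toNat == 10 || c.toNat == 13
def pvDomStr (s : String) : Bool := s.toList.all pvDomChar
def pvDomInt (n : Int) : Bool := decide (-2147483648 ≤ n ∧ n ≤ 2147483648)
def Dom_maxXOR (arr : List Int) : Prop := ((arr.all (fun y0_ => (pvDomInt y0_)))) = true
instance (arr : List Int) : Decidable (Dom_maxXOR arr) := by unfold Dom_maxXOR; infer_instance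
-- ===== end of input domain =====

-- B replaces A's monotonic stack by a direct scan of the earlier elements for the
-- nearest previous element ≥ the current one (simpler, no stack bookkeeping).
-- Both Pythons reverse `arr` in place; the equivalence proved is about the return value.

-- ===== PORT A =====
-- the `while stack and stack[-1] < i` pop loop (stack stored head = top); l tracks the length
def popLoopA (i : Int) : List Int → Int → List Int × Int
  | [], l => ([], l)
  | t :: rest, l => if t < i then popLoopA i rest (l - 1) else (t :: rest, l)

-- one iteration of A's `for i in arr` body over state (stack, l, res)
def stepA (s : List Int × Int × Int) (i : Int) : List Int × Int × Int :=
  let p := popLoopA i s.1 s.2.1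
  let stack := i :: p.1
  let l := p.2 + 1
  let res :=
    if l > 1 then
      match stack with
      | a :: b :: _ => max s.2.2 (PySem.Int.bxor a b)   -- stack[-1] ^ stack[-2]
      | _ => s.2.2
    else s.2.2
  (stack, l, res)

def maxXOR (arr : List Int) : Int :=
  let res1 := (arr.foldl stepA ([], 0, 0)).2.2
  -- arr.reverse(); second pass on the reversed array with a cleared stack
  let res2 := (arr.reverse.foldl stepA ([], 0, 0)).2.2
  max res1 res2

-- ===== PORT B =====
-- Source B's inner `for y in prev: if y >= x: …; break` scan
def scanB (x res : Int) : List Int → Int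
  | [] => res
  | y :: rest => if y ≥ x then max res (PySem.Int.bxor x y) else scanB x res rest

-- one iteration of Source B's `for x in a` body over state (prev, res); prev.insert(0, x)
def stepB (s : List Int × Int) (x : Int) : List Int × Int :=
  (x :: s.1, scanB x s.2 s.1)

def maxXOR_alt (arr : List Int) : Int :=
  let res1 := (arr.foldl stepB ([], 0)).2
  let res2 := (arr.reverse.foldl stepB ([], 0)).2
  max res1 res2

-- ===== PRECONDITION & SPEC =====
def Spec_maxXOR (arr : List Int) (out : Int) : Prop := out = maxXOR_alt arr
instance (arr : List Int) (out : Int) : Decidable (Spec_maxXOR arr out) := by unfold Spec_maxXOR; infer_instance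

-- ===== CLAIM (what is proved, stated in full; the proofs are below) =====
def Claim_equal_maxXOR : Prop := ∀ (arr : List Int), Dom_maxXOR arr → Spec_maxXOR arr (maxXOR arr)

-- ===== LEMMAS AND PROOFS =====

-- A's pop loop is dropWhile (< i), and it keeps l in step with the stack length.
theorem popLoopA_eq (i : Int) (stack : List Int) :
    popLoopA i stack (stack.length : Int) =
      (stack.dropWhile (fun y => decide (y < i)),
       ((stack.dropWhile (fun y => decide (y < i))).length : Int)) := by
  induction stack with
  | nil => simp [popLoopA]
  | cons t rest ih =>
    by_cases h : t < i
    · simp [popLoopA, List.dropWhile, h, ih]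
    · simp [popLoopA, List.dropWhile, h]

-- B's scan is the first y in prev with x ≤ y.
theorem scanB_eq (x res : Int) (prev : List Int) :
    scanB x res prev =
      match prev.find? (fun y => decide (x ≤ y)) with
      | some y => max res (PySem.Int.bxor x y)
      | none => res := by
  induction prev with
  | nil => simp [scanB]
  | cons y rest ih =>
    by_cases h : x ≤ y
    · simp [scanB, h, List.find?]
    · have h' : ¬ (y ≥ x) := h
      simp [scanB, h', List.find?, ih]

-- find? (t ≤ ·) is unchanged by dropping elements < x when x < t.
theorem find?_dropWhile_lt (t x : Int) (hx : x < t) (s : List Int) :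
    (s.dropWhile (fun y => decide (y < x))).find? (fun y => decide (t ≤ y)) =
      s.find? (fun y => decide (t ≤ y)) := by
  induction s with
  | nil => simp
  | cons a rest ih =>
    by_cases h : a < x
    · have h' : ¬ t ≤ a := by omega
      simp [List.dropWhile, h, List.find?, h', ih]
    · simp [List.dropWhile, h]

-- find? over a sorted-enough stack is the head of dropWhile (< x).
theorem find?_eq_head_dropWhile (x : Int) (s : List Int) :
    s.find? (fun y => decide (x ≤ y)) = (s.dropWhile (fun y => decide (y < x))).head? := by
  induction s with
  | nil => simp
  | cons a rest ih =>
    by_cases h : x ≤ a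
    · have h' : ¬ a < x := by omega
      simp [List.find?, h, List.dropWhile, h']
    · have h' : a < x := by omega
      simp [List.find?, h, List.dropWhile, h', ih]

-- Main loop invariant: if prev and stack agree on first-element-≥-t queries,
-- A's fold (with l = stack length) and B's fold produce the same res.
theorem foldEq (a : List Int) :
    ∀ (prev stack : List Int) (res : Int),
      (∀ t, prev.find? (fun y => decide (t ≤ y)) = stack.find? (fun y => decide (t ≤ y))) →
      (a.foldl stepA (stack, (stack.length : Int), res)).2.2
        = (a.foldl stepB (prev, res)).2 := by
  induction a with
  | nil => intro prev stack res _; simp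
  | cons x rest ih =>
    intro prev stack res hinv
    have hpop := popLoopA_eq x stack
    set S' := stack.dropWhile (fun y => decide (y < x)) with hS'
    have hfind : prev.find? (fun y => decide (x ≤ y)) = S'.head? := by
      rw [hinv x, find?_eq_head_dropWhile]
    -- compute both step results
    have hA : stepA (stack, (stack.length : Int), res) x =
        (x :: S', ((S'.length : Int) + 1),
          match S'.head? with
          | some b => max res (PySem.Int.bxor x b)
          | none => res) := by
      cases S'case : S' with
      | nil => simp [stepA, hpop, S'case]
      | cons b r =>
        simp [stepA, hpop, S'case]
    have hB : stepB (prev, res) x =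
        (x :: prev,
          match S'.head? with
          | some b => max res (PySem.Int.bxor x b)
          | none => res) := by
      simp [stepB, scanB_eq, hfind]
    have hlen : ((S'.length : Int) + 1) = ((x :: S').length : Int) := by simp
    rw [List.foldl_cons, List.foldl_cons, hA, hB, hlen]
    apply ih
    intro t
    by_cases ht : t ≤ x
    · simp [List.find?, ht]
    · have hx : x < t := by omega
      have h1 : ¬ t ≤ x := ht
      have hd : decide (t ≤ x) = false := by simp [ht]
      simp only [List.find?, hd]
      rw [hinv t]
      exact (find?_dropWhile_lt t x hx stack).symm

-- ===== VERDICT (by name: the statement is the Claim_ definition above) =====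
theorem maxXOR_spec : Claim_equal_maxXOR := by
  intro arr _
  unfold Spec_maxXOR maxXOR maxXOR_alt
  have h1 := foldEq arr [] [] 0 (by intro t; simp)
  have h2 := foldEq arr.reverse [] [] 0 (by intro t; simp)
  simp only [List.length_nil, Int.natCast_zero] at h1 h2
  rw [h1, h2]
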